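-- pv_equiv track=rewrite | github.com/WISDEM/CommonSE | src/commonse/mpi_tools.py | map_comm_heirarchical
-- ===== SOURCE A (Python) =====
-- def map_comm_heirarchical(K, K2):
--     """
--     Heirarchical parallelization communicator mapping.  Assumes K top level processes with K2 subprocessors each.
--     Requires comm_world_size >= K + K*K2.  Noninclusive, Ki not included in K2i execution.
--     (TODO, this is not the most efficient architecture, could be achieve with K fewer processors, but this was easier to generalize)
--     """
--     N             = K + K*K2
--     comm_map_down = {}
--     comm_map_up   = {}
--     color_map     = [0]*K
--
--     for i in range(K):
--         comm_map_down[i] = [K+j+i*K2 for j in range(K2)]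
--         color_map.extend([i+1]*K2)
--
--         for j in comm_map_down[i]:
--             comm_map_up[j] = i
--
--     return comm_map_down, comm_map_up, color_map
-- ===== SOURCE B (Python) =====
-- def map_comm_heirarchical(K, K2):
--     """Single pass over the flat rank space 0..K+K*K2-1: each rank classifies
--     itself (top-level if p < K, else its parent is (p-K)//K2), instead of
--     enumerating parents and generating each one's child list."""
--     comm_map_down = {i: [] for i in range(K)}
--     comm_map_up = {}
--     color_map = []
--     for p in range(K + K * K2):
--         if p < K:
--             color_map.append(0)
--         else:
--             i = (p - K) // K2
--             comm_map_down[i].append(p)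
--             comm_map_up[p] = i
--             color_map.append(i + 1)
--     return comm_map_down, comm_map_up, color_map
-- ===== Notes on version B (the rewrite author's own statement) =====
-- stated objective: alternative
-- what changed: A enumerates parents, generating each parent's child list and inverting it in a nested loop; B makes one pass over the flat rank space 0..K+K*K2-1 in which each rank classifies itself, computing its parent by floor division (p-K)//K2 and appending itself to a pre-seeded parent list.
-- outside the precondition, e.g. on map_comm_heirarchical(2, -1): A returns ({0: [], 1: []}, {}, [0, 0]), B returns ({0: [], 1: []}, {}, [])
import Mathlib
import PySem

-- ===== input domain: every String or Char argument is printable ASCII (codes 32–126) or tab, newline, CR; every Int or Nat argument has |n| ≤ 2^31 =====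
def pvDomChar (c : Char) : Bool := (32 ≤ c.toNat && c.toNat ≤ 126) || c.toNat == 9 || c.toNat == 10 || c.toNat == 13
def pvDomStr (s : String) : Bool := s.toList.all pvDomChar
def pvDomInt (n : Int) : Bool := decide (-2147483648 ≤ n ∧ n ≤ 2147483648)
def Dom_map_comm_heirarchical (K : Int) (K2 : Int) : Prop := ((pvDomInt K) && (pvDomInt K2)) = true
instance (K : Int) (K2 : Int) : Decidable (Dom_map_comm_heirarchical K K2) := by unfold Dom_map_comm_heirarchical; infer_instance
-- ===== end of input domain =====

-- B makes a single pass over the flat rank space 0..K+K*K2-1 in which each rank classifies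
-- itself (top-level if p < K, else its parent is (p-K)//K2 by floor division), instead of A's
-- loop over parents generating each one's child list and inverting it in a nested loop.

-- ===== PORT A =====
-- A's fused loop: one pass over range(K) carrying (comm_map_down, comm_map_up, color_map).
def map_comm_heirarchical (K : Int) (K2 : Int) : (List (Int × List Int)) × (List (Int × Int)) × List Int :=
  let _N := K + K * K2    -- N is computed but unused in A
  let init : PySem.Dict Int (List Int) × PySem.Dict Int Int × List Int :=
    (PySem.Dict.empty, PySem.Dict.empty, List.replicate K.toNat 0)   -- [0]*K (n ≤ 0 gives [])
  let st := (PySem.List.pyRange 0 K 1).foldl (fun st i =>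
    let d := st.1.insert i ((PySem.List.pyRange 0 K2 1).map (fun j => K + j + i * K2))
    let c := st.2.2 ++ List.replicate K2.toNat (i + 1)               -- extend with [i+1]*K2
    let u := (d.getD i []).foldl (fun u j => u.insert j i) st.2.1    -- for j in comm_map_down[i]
    (d, u, c)) init
  (st.1.items, st.2.1.items, st.2.2)

-- ===== PORT B =====
-- B: seed comm_map_down with an empty list per parent, then one flat pass over range(K+K*K2)
-- in which each rank p either records a 0 color (p < K) or computes its parent by floor division.
-- The for loop is ported as fuel recursion; the contains guard is exactly where Python's
-- comm_map_down[i].append(p) raises KeyError (never inside Pre_), where the port stops.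
def pvAltLoop (K K2 : Int) :
    Nat → Int → PySem.Dict Int (List Int) × PySem.Dict Int Int × List Int →
    PySem.Dict Int (List Int) × PySem.Dict Int Int × List Int
  | 0, _, st => st
  | Nat.succ fuel, p, st =>
    if p < K then pvAltLoop K K2 fuel (p + 1) (st.1, st.2.1, st.2.2 ++ [(0 : Int)])
    else
      let i := PySem.Int.floordiv (p - K) K2
      if st.1.contains i then
        pvAltLoop K K2 fuel (p + 1)
          (st.1.modify i [] (fun l => l ++ [p]), st.2.1.insert p i, st.2.2 ++ [i + 1])
      else st

def map_comm_heirarchical_alt (K : Int) (K2 : Int) : (List (Int × List Int)) × (List (Int × Int)) × List Int :=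
  let down0 : PySem.Dict Int (List Int) :=
    (PySem.List.pyRange 0 K 1).foldl (fun d i => d.insert i ([] : List Int)) PySem.Dict.empty
  let st := pvAltLoop K K2 (K + K * K2).toNat 0
    (down0, (PySem.Dict.empty : PySem.Dict Int Int), ([] : List Int))
  (st.1.items, st.2.1.items, st.2.2)

-- ===== PRECONDITION & SPEC =====
-- Pre_ excludes K2 < 0 (a negative subgroup size, outside the function's natural domain of
-- process counts): A still returns there (color_map [0]*K with everything else empty) while
-- B's flat-rank pass yields an empty color_map or raises a KeyError.
def Pre_map_comm_heirarchical (K : Int) (K2 : Int) : Prop := 0 ≤ K2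
instance (K : Int) (K2 : Int) : Decidable (Pre_map_comm_heirarchical K K2) := by unfold Pre_map_comm_heirarchical; infer_instance
def pvWitness_map_comm_heirarchical : Int × Int := (3, 2)
def Spec_map_comm_heirarchical (K : Int) (K2 : Int) (out : (List (Int × List Int)) × (List (Int × Int)) × List Int) : Prop := out = map_comm_heirarchical_alt K K2
instance (K : Int) (K2 : Int) (out : (List (Int × List Int)) × (List (Int × Int)) × List Int) : Decidable (Spec_map_comm_heirarchical K K2 out) := by unfold Spec_map_comm_heirarchical; infer_instance

-- ===== CLAIM (what is proved, stated in full; the proofs are below) =====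
def Claim_equal_map_comm_heirarchical : Prop := ∀ (K : Int) (K2 : Int), Dom_map_comm_heirarchical K K2 → Pre_map_comm_heirarchical K K2 → Spec_map_comm_heirarchical K K2 (map_comm_heirarchical K K2)

-- ===== LEMMAS AND PROOFS =====

-- folding a componentwise step over a triple splits into three independent folds
theorem pvFoldlTriple {α β γ δ : Type} (l : List δ) (fd : α → δ → α) (fu : β → δ → β)
    (fc : γ → δ → γ) (d : α) (u : β) (c : γ) :
    l.foldl (fun st i => (fd st.1 i, fu st.2.1 i, fc st.2.2 i)) (d, u, c) =
      (l.foldl fd d, l.foldl fu u, l.foldl fc c) := by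
  induction l generalizing d u c with
  | nil => rfl
  | cons x xs ih => simp [List.foldl, ih]

-- A's comprehension row equals the contiguous child range of parent i
theorem pvRowEq (K K2 i : Int) :
    (PySem.List.pyRange 0 K2 1).map (fun j => K + j + i * K2) =
      PySem.List.pyRange (K + i * K2) (K + (i + 1) * K2) 1 := by
  rw [PySem.List.pyRange_one, PySem.List.pyRange_one, List.map_map]
  have h : (K + (i + 1) * K2 - (K + i * K2)) = K2 - 0 := by ring
  rw [h]
  exact List.map_congr_left (fun k _ => by simp; ring)

-- [i+1]*K2 is the constant map over parent i's child range
theorem pvReplRow (K K2 i : Int) :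
    List.replicate K2.toNat (i + 1) =
      (PySem.List.pyRange (K + i * K2) (K + (i + 1) * K2) 1).map (fun _ => i + 1) := by
  have h : (K + (i + 1) * K2 - (K + i * K2)) = K2 := by ring
  rw [List.map_const', PySem.List.length_pyRange_one, h]

-- the nested inversion loop of A, characterised as a flatMap (rows are disjoint ascending blocks)
theorem pvUpItems (K K2 : Int) (hK2 : 0 < K2) (n : ℕ) :
    ((PySem.List.pyRange 0 (n : Int) 1).foldl
        (fun u i => (PySem.List.pyRange (K + i * K2) (K + (i + 1) * K2) 1).foldl
          (fun u j => u.insert j i) u) PySem.Dict.empty).items =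
      (PySem.List.pyRange 0 (n : Int) 1).flatMap
        (fun i => (PySem.List.pyRange (K + i * K2) (K + (i + 1) * K2) 1).map (fun j => (j, i))) := by
  induction n with
  | zero =>
    simp only [Nat.cast_zero]
    rw [PySem.List.pyRange_one_eq_nil (le_refl 0)]
    rfl
  | succ n ih =>
    have hsplit : PySem.List.pyRange 0 ((n : Int) + 1) 1 =
        PySem.List.pyRange 0 (n : Int) 1 ++ [(n : Int)] :=
      PySem.List.pyRange_one_succ_right (by positivity)
    have hfresh : ∀ a ∈ PySem.List.pyRange (K + (n : Int) * K2) (K + ((n : Int) + 1) * K2) 1,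
        ((PySem.List.pyRange 0 (n : Int) 1).foldl
          (fun u i => (PySem.List.pyRange (K + i * K2) (K + (i + 1) * K2) 1).foldl
            (fun u j => u.insert j i) u) PySem.Dict.empty).contains a = false := by
      intro a ha
      rw [PySem.List.mem_pyRange_one] at ha
      rw [PySem.Dict.contains_eq_decide_mem_keys]
      simp only [decide_eq_false_iff_not, PySem.Dict.keys]
      rw [ih]
      simp only [List.map_flatMap, List.map_map, List.mem_flatMap]
      rintro ⟨i, hi, hai⟩
      rw [PySem.List.mem_pyRange_one] at hi
      simp only [List.mem_map, Function.comp] at hai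
      obtain ⟨j, hj, rfl⟩ := hai
      rw [PySem.List.mem_pyRange_one] at hj
      have : (i + 1) * K2 ≤ (n : Int) * K2 :=
        mul_le_mul_of_nonneg_right (by omega) (le_of_lt hK2)
      omega
    have hnodup : ((PySem.List.pyRange (K + (n : Int) * K2) (K + ((n : Int) + 1) * K2) 1).map
        (fun j => j)).Nodup := by
      simpa using PySem.List.nodup_pyRange_one (K + (n : Int) * K2) (K + ((n : Int) + 1) * K2)
    push_cast
    rw [hsplit, List.foldl_append, List.flatMap_append]
    simp only [List.foldl_cons, List.foldl_nil, List.flatMap_cons, List.flatMap_nil,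
      List.append_nil]
    rw [PySem.Dict.items_foldl_insert_fresh
        (PySem.List.pyRange (K + (n : Int) * K2) (K + ((n : Int) + 1) * K2) 1)
        (fun j => j) (fun _ => (n : Int)) _ hfresh hnodup, ih]

-- the flatMap of ascending blocks equals the arithmetic map over the flat rank range
theorem pvUpArith (K K2 : Int) (hK2 : 0 < K2) (n : ℕ) :
    (PySem.List.pyRange 0 (n : Int) 1).flatMap
        (fun i => (PySem.List.pyRange (K + i * K2) (K + (i + 1) * K2) 1).map (fun j => (j, i))) =
      (PySem.List.pyRange K (K + (n : Int) * K2) 1).map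
        (fun p => (p, PySem.Int.floordiv (p - K) K2)) := by
  induction n with
  | zero => simp [PySem.List.pyRange_one_eq_nil]
  | succ n ih =>
    have h0 : (0 : Int) ≤ (n : Int) * K2 := by positivity
    have h1 : (n : Int) * K2 ≤ ((n : Int) + 1) * K2 := by nlinarith
    have hsplit : PySem.List.pyRange 0 ((n : Int) + 1) 1 =
        PySem.List.pyRange 0 (n : Int) 1 ++ [(n : Int)] :=
      PySem.List.pyRange_one_succ_right (by positivity)
    have hsplit2 : PySem.List.pyRange K (K + ((n : Int) + 1) * K2) 1 =
        PySem.List.pyRange K (K + (n : Int) * K2) 1 ++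
          PySem.List.pyRange (K + (n : Int) * K2) (K + ((n : Int) + 1) * K2) 1 :=
      PySem.List.pyRange_one_append _ _ _ (by omega) (by omega)
    push_cast
    rw [hsplit, hsplit2, List.flatMap_append, List.map_append, ih]
    congr 1
    rw [List.flatMap_singleton]
    refine List.map_congr_left (fun p hp => ?_)
    rw [PySem.List.mem_pyRange_one] at hp
    have : PySem.Int.floordiv (p - K) K2 = (n : Int) := by
      rw [PySem.Int.floordiv_eq_iff_of_pos hK2]
      constructor <;> nlinarith [hp.1, hp.2]
    rw [this]

-- corollary of pvUpArith with the pair components swapped (parent first)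
theorem pvPairsSwap (K K2 : Int) (hK2 : 0 < K2) (n : ℕ) :
    (PySem.List.pyRange K (K + (n : Int) * K2) 1).map
        (fun p => (PySem.Int.floordiv (p - K) K2, p)) =
      (PySem.List.pyRange 0 (n : Int) 1).flatMap
        (fun i => (PySem.List.pyRange (K + i * K2) (K + (i + 1) * K2) 1).map (fun j => (i, j))) := by
  have h := congrArg (List.map (fun pr : Int × Int => (pr.2, pr.1))) (pvUpArith K K2 hK2 n)
  simp only [List.map_flatMap, List.map_map, Function.comp_def] at h
  exact h.symm

-- corollary of pvUpArith: the color tail as an arithmetic map over the flat rank range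
theorem pvColorTail (K K2 : Int) (hK2 : 0 < K2) (n : ℕ) :
    (PySem.List.pyRange 0 (n : Int) 1).flatMap (fun i => List.replicate K2.toNat (i + 1)) =
      (PySem.List.pyRange K (K + (n : Int) * K2) 1).map
        (fun p => PySem.Int.floordiv (p - K) K2 + 1) := by
  have h := congrArg (List.map (fun pr : Int × Int => pr.2 + 1)) (pvUpArith K K2 hK2 n)
  simp only [List.map_flatMap, List.map_map, Function.comp_def] at h
  rw [← h]
  exact List.flatMap_congr (fun i _ => pvReplRow K K2 i)

-- a flatMap over range(K) in which only index i contributes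
theorem pvFlatMapSingle {β : Type} (K i : Int) (h0 : 0 ≤ i) (hK : i < K) (L : List β) :
    (PySem.List.pyRange 0 K 1).flatMap (fun i' => if i' = i then L else []) = L := by
  rw [PySem.List.pyRange_one_append 0 i K h0 (le_of_lt hK),
    PySem.List.pyRange_one_cons hK, List.flatMap_append, List.flatMap_cons, if_pos rfl]
  have h1 : (PySem.List.pyRange 0 i 1).flatMap (fun i' => if i' = i then L else []) = [] := by
    rw [List.flatMap_eq_nil_iff]
    intro x hx
    rw [PySem.List.mem_pyRange_one] at hx
    exact if_neg (by omega)
  have h2 : (PySem.List.pyRange (i + 1) K 1).flatMap (fun i' => if i' = i then L else []) = [] := by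
    rw [List.flatMap_eq_nil_iff]
    intro x hx
    rw [PySem.List.mem_pyRange_one] at hx
    exact if_neg (by omega)
  rw [h1, h2, List.append_nil, List.nil_append]

-- a dict with unique keys is its key list paired with its values
theorem pvItemsEqMapKeys (d : PySem.Dict Int (List Int)) (h : d.keys.Nodup) :
    d.items = d.keys.map (fun k => (k, d.getD k [])) := by
  conv_lhs => rw [← List.map_id d.items]
  simp only [PySem.Dict.keys, List.map_map, Function.comp_def]
  refine List.map_congr_left (fun p hp => ?_)
  have hmem : (p.1, p.2) ∈ d.items := by rwa [Prod.mk.eta]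
  have := PySem.Dict.getD_of_mem_items d hmem h []
  simp [this]

-- B's seeded-then-appended comm_map_down has exactly A's rows, in parent order
theorem pvDownB (K K2 : Int) (hK : 0 < K) (hK2 : 0 ≤ K2) :
    ((PySem.List.pyRange K (K + K * K2) 1).foldl
        (fun d p => d.modify (PySem.Int.floordiv (p - K) K2) [] (fun l => l ++ [p]))
        ((PySem.List.pyRange 0 K 1).foldl (fun d i => d.insert i ([] : List Int))
          PySem.Dict.empty)).items =
      (PySem.List.pyRange 0 K 1).map
        (fun i => (i, PySem.List.pyRange (K + i * K2) (K + (i + 1) * K2) 1)) := by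
  set P := PySem.List.pyRange 0 K 1 with hP
  set Q := PySem.List.pyRange K (K + K * K2) 1 with hQ
  have hnodupP : P.Nodup := PySem.List.nodup_pyRange_one 0 K
  have hd0items : ((P.foldl (fun d i => d.insert i ([] : List Int)) PySem.Dict.empty)).items =
      P.map (fun i => (i, ([] : List Int))) := by
    rw [PySem.Dict.items_foldl_insert_fresh P (fun i => i) (fun _ => ([] : List Int))
      PySem.Dict.empty (fun a _ => PySem.Dict.contains_empty a) (by simpa using hnodupP)]
    rfl
  set d0 := P.foldl (fun d i => d.insert i ([] : List Int)) PySem.Dict.empty with hd0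
  have hd0keys : d0.keys = P := by
    simp [PySem.Dict.keys, hd0items, List.map_map, Function.comp_def]
  have hmemkey : ∀ p ∈ Q, PySem.Int.floordiv (p - K) K2 ∈ P := by
    intro p hp
    rw [hQ, PySem.List.mem_pyRange_one] at hp
    have hK2' : 0 < K2 := by
      rcases lt_or_eq_of_le hK2 with h | h
      · exact h
      · exfalso; rw [← h] at hp; omega
    rw [hP, PySem.List.mem_pyRange_one]
    constructor
    · rw [PySem.Int.le_floordiv_iff_mul_le hK2']; omega
    · rw [PySem.Int.floordiv_lt_iff_lt_mul hK2']; nlinarith [hp.1, hp.2]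
  have hkeys : ((Q.foldl (fun d p =>
      d.modify (PySem.Int.floordiv (p - K) K2) [] (fun l => l ++ [p])) d0)).keys = P := by
    rw [PySem.Dict.keys_foldl_modify_key Q (fun p => PySem.Int.floordiv (p - K) K2) []
      (fun _ p l => l ++ [p]) d0, hd0keys, PySem.Set.update_eq_append_filter]
    have : (PySem.Set.ofList (Q.map (fun p => PySem.Int.floordiv (p - K) K2))).filter
        (fun y => !(PySem.Set.contains P y)) = [] := by
      rw [List.filter_eq_nil_iff]
      intro a ha
      rw [PySem.Set.mem_ofList, List.mem_map] at ha
      obtain ⟨p, hp, rfl⟩ := ha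
      simp only [Bool.not_eq_true', ← Bool.not_eq_true, PySem.Set.contains_iff]
      exact fun h => h (hmemkey p hp)
    rw [this, List.append_nil]
  have hnodupKeys : ((Q.foldl (fun d p =>
      d.modify (PySem.Int.floordiv (p - K) K2) [] (fun l => l ++ [p])) d0)).keys.Nodup := by
    rw [hkeys]; exact hnodupP
  rw [pvItemsEqMapKeys _ hnodupKeys, hkeys]
  refine List.map_congr_left (fun i hi => ?_)
  have hi' := hi
  rw [hP, PySem.List.mem_pyRange_one] at hi'
  -- compute the final value at key i
  have hfold : (Q.foldl (fun d p =>
      d.modify (PySem.Int.floordiv (p - K) K2) [] (fun l => l ++ [p])) d0) =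
      ((Q.map (fun p => (PySem.Int.floordiv (p - K) K2, p))).foldl
        (fun d pr => d.modify pr.1 [] (fun l => l ++ [pr.2])) d0) := by
    rw [List.foldl_map]
  have hd0getD : d0.getD i [] = [] := by
    have hnodupK : d0.keys.Nodup := by rw [hd0keys]; exact hnodupP
    exact PySem.Dict.getD_of_mem_items d0 (by rw [hd0items]; exact List.mem_map_of_mem hi) hnodupK []
  rw [hfold, PySem.Dict.getD_foldl_modify_append, hd0getD, List.nil_append]
  rcases lt_or_eq_of_le hK2 with hK2' | hK2'
  · -- K2 > 0 : the flat range decomposes into the parent rows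
    have hcast : K = ((K.toNat : Int)) := by omega
    have hswap := pvPairsSwap K K2 hK2' K.toNat
    rw [← hcast] at hswap
    rw [hQ, hswap, List.filter_flatMap]
    have hinner : ∀ i' ∈ P,
        ((PySem.List.pyRange (K + i' * K2) (K + (i' + 1) * K2) 1).map
          (fun j => (i', j))).filter (fun pr => pr.1 == i) =
        if i' = i then (PySem.List.pyRange (K + i * K2) (K + (i + 1) * K2) 1).map
          (fun j => (i, j)) else [] := by
      intro i' _
      rw [List.filter_map]
      by_cases h : i' = i
      · subst h
        simp [Function.comp_def]
      · simp [Function.comp_def, h]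
    rw [List.flatMap_congr hinner, hP, pvFlatMapSingle K i hi'.1 hi'.2, List.map_map]
    simp
  · -- K2 = 0 : no children at all
    have hQnil : Q = [] := by
      rw [hQ, ← hK2']
      exact PySem.List.pyRange_one_eq_nil (by omega)
    have hRnil : PySem.List.pyRange (K + i * K2) (K + (i + 1) * K2) 1 = [] := by
      rw [← hK2']
      exact PySem.List.pyRange_one_eq_nil (by omega)
    rw [hQnil, hRnil]
    rfl


-- the seeding pass keys comm_map_down on every parent, in order
theorem pvDown0Keys (K : Int) :
    ((PySem.List.pyRange 0 K 1).foldl (fun d i => d.insert i ([] : List Int))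
      PySem.Dict.empty).keys = PySem.List.pyRange 0 K 1 := by
  rw [PySem.Dict.keys_foldl_insert (PySem.List.pyRange 0 K 1)
      (fun _ _ => ([] : List Int)) PySem.Dict.empty, PySem.Dict.keys_empty,
    PySem.Set.update_eq_append_of_disjoint [] (PySem.List.pyRange 0 K 1)
      (PySem.List.nodup_pyRange_one 0 K) (by simp), List.nil_append]

-- B's fuel loop never hits the KeyError stop while every parent key is seeded,
-- and then equals the fold of the branching step over the flat rank range
theorem pvLoopEq (K K2 : Int) : ∀ (n : Nat) (p : Int)
    (st : PySem.Dict Int (List Int) × PySem.Dict Int Int × List Int),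
    st.1.keys = PySem.List.pyRange 0 K 1 →
    (∀ q : Int, ¬ q < K → p ≤ q → q < p + (n : Int) →
      PySem.Int.floordiv (q - K) K2 ∈ PySem.List.pyRange 0 K 1) →
    pvAltLoop K K2 n p st =
      (PySem.List.pyRange p (p + (n : Int)) 1).foldl
        (fun st p =>
          if p < K then (st.1, st.2.1, st.2.2 ++ [(0 : Int)])
          else
            (st.1.modify (PySem.Int.floordiv (p - K) K2) [] (fun l => l ++ [p]),
             st.2.1.insert p (PySem.Int.floordiv (p - K) K2),
             st.2.2 ++ [PySem.Int.floordiv (p - K) K2 + 1])) st := by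
  intro n
  induction n with
  | zero =>
    intro p st _ _
    rw [show p + ((0 : Nat) : Int) = p by simp,
      PySem.List.pyRange_one_eq_nil (le_refl p)]
    rfl
  | succ n ih =>
    intro p st hkeys hmem
    have hcast : ((n + 1 : Nat) : Int) = (n : Int) + 1 := by push_cast; ring
    rw [hcast] at hmem ⊢
    rw [PySem.List.pyRange_one_cons (by omega : p < p + ((n : Int) + 1)), List.foldl_cons]
    have hre : PySem.List.pyRange (p + 1) (p + ((n : Int) + 1)) 1 =
        PySem.List.pyRange (p + 1) (p + 1 + (n : Int)) 1 := by ring_nf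
    by_cases hp : p < K
    · simp only [pvAltLoop, if_pos hp]
      rw [hre]
      exact ih (p + 1) (st.1, st.2.1, st.2.2 ++ [(0 : Int)]) hkeys
        (fun q h1 h2 h3 => hmem q h1 (by omega) (by omega))
    · have hi : PySem.Int.floordiv (p - K) K2 ∈ PySem.List.pyRange 0 K 1 :=
        hmem p hp (le_refl p) (by omega)
      have hcon : st.1.contains (PySem.Int.floordiv (p - K) K2) = true := by
        rw [PySem.Dict.contains_eq_decide_mem_keys, hkeys]
        exact decide_eq_true hi
      have hkeys' : (st.1.modify (PySem.Int.floordiv (p - K) K2) []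
          (fun l => l ++ [p])).keys = PySem.List.pyRange 0 K 1 := by
        rw [PySem.Dict.keys_modify, PySem.Dict.keys_insert_of_contains _ _ hcon, hkeys]
      simp only [pvAltLoop, if_neg hp, hcon, if_true]
      rw [hre]
      exact ih (p + 1) _ hkeys'
        (fun q h1 h2 h3 => hmem q h1 (by omega) (by omega))

-- ===== VERDICT (by name: the statement is the Claim_ definition above) =====
theorem map_comm_heirarchical_spec : Claim_equal_map_comm_heirarchical := by
  intro K K2 _ hpre
  have hK2 : (0 : Int) ≤ K2 := hpre
  unfold Spec_map_comm_heirarchical map_comm_heirarchical map_comm_heirarchical_alt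
  by_cases hK : K ≤ 0
  · -- no parents at all: both sides are ([], [], [])
    have hN : K + K * K2 ≤ 0 := by nlinarith
    have hfuel : (K + K * K2).toNat = 0 := Int.toNat_of_nonpos hN
    simp only [PySem.List.pyRange_one_eq_nil hK, hfuel]
    simp [pvAltLoop, Int.toNat_of_nonpos hK]
  · rw [not_le] at hK
    -- ---- A's fused fold, componentwise ----
    have hstep : (fun (st : PySem.Dict Int (List Int) × PySem.Dict Int Int × List Int) (i : Int) =>
        let d := st.1.insert i ((PySem.List.pyRange 0 K2 1).map (fun j => K + j + i * K2))
        let c := st.2.2 ++ List.replicate K2.toNat (i + 1)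
        let u := (d.getD i []).foldl (fun u j => u.insert j i) st.2.1
        (d, u, c)) =
        (fun st i =>
          (st.1.insert i (PySem.List.pyRange (K + i * K2) (K + (i + 1) * K2) 1),
           (PySem.List.pyRange (K + i * K2) (K + (i + 1) * K2) 1).foldl
              (fun u j => u.insert j i) st.2.1,
           st.2.2 ++ List.replicate K2.toNat (i + 1))) := by
      funext st i
      simp only [PySem.Dict.getD_insert_self, pvRowEq]
    rw [hstep]
    dsimp only
    rw [pvFoldlTriple (PySem.List.pyRange 0 K 1)
          (fun d i => d.insert i (PySem.List.pyRange (K + i * K2) (K + (i + 1) * K2) 1))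
          (fun u i => (PySem.List.pyRange (K + i * K2) (K + (i + 1) * K2) 1).foldl
            (fun u j => u.insert j i) u)
          (fun c i => c ++ List.replicate K2.toNat (i + 1))
          PySem.Dict.empty PySem.Dict.empty (List.replicate K.toNat 0)]
    -- ---- B's fuel loop never stops early inside Pre_: turn it into a fold ----
    have h0KN : (0 : Int) ≤ K + K * K2 := by nlinarith
    have hfuel : (((K + K * K2).toNat : Nat) : Int) = K + K * K2 := Int.toNat_of_nonneg h0KN
    have hmemq : ∀ q : Int, ¬ q < K → (0 : Int) ≤ q →
        q < 0 + (((K + K * K2).toNat : Nat) : Int) →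
        PySem.Int.floordiv (q - K) K2 ∈ PySem.List.pyRange 0 K 1 := by
      intro q hq _ hq2
      rw [hfuel] at hq2
      rw [not_lt] at hq
      have hK2' : 0 < K2 := by
        rcases lt_or_eq_of_le hK2 with h | h
        · exact h
        · exfalso; rw [← h] at hq2; omega
      rw [PySem.List.mem_pyRange_one]
      constructor
      · rw [PySem.Int.le_floordiv_iff_mul_le hK2']; omega
      · rw [PySem.Int.floordiv_lt_iff_lt_mul hK2']; nlinarith [hq2]
    rw [pvLoopEq K K2 ((K + K * K2).toNat) 0 _ (pvDown0Keys K) hmemq]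
    rw [show (0 : Int) + (((K + K * K2).toNat : Nat) : Int) = K + K * K2 by
      rw [hfuel]; ring]
    -- ---- B's flat fold: split the rank range at K ----
    have hKN : K ≤ K + K * K2 := by nlinarith
    rw [PySem.List.pyRange_one_append 0 K (K + K * K2) (le_of_lt hK) hKN, List.foldl_append]
    -- phase 1: ranks below K only append a 0 color
    rw [PySem.List.foldl_congr_mem (PySem.List.pyRange 0 K 1) _
        (fun (st : PySem.Dict Int (List Int) × PySem.Dict Int Int × List Int) (_ : Int) =>
          (st.1, st.2.1, st.2.2 ++ [(0 : Int)])) _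
        (by
          intro acc x hx
          rw [PySem.List.mem_pyRange_one] at hx
          rw [if_pos hx.2])]
    rw [pvFoldlTriple (PySem.List.pyRange 0 K 1)
          (fun (d : PySem.Dict Int (List Int)) (_ : Int) => d)
          (fun (u : PySem.Dict Int Int) (_ : Int) => u)
          (fun (c : List Int) (_ : Int) => c ++ [(0 : Int)])]
    rw [List.foldl_fixed, List.foldl_fixed,
      PySem.List.foldl_append_singleton_eq_map (fun (_ : Int) => (0 : Int))]
    have hzeros : ([] : List Int) ++ (PySem.List.pyRange 0 K 1).map (fun _ => (0 : Int)) =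
        List.replicate K.toNat 0 := by
      rw [List.nil_append, List.map_const', PySem.List.length_pyRange_one]
      norm_num
    rw [hzeros]
    -- phase 2: ranks at or above K classify themselves by floor division
    rw [PySem.List.foldl_congr_mem (PySem.List.pyRange K (K + K * K2) 1) _
        (fun (st : PySem.Dict Int (List Int) × PySem.Dict Int Int × List Int) (p : Int) =>
          (st.1.modify (PySem.Int.floordiv (p - K) K2) [] (fun l => l ++ [p]),
           st.2.1.insert p (PySem.Int.floordiv (p - K) K2),
           st.2.2 ++ [PySem.Int.floordiv (p - K) K2 + 1])) _
        (by
          intro acc x hx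
          rw [PySem.List.mem_pyRange_one] at hx
          rw [if_neg (by omega)])]
    rw [pvFoldlTriple (PySem.List.pyRange K (K + K * K2) 1)
          (fun (d : PySem.Dict Int (List Int)) (p : Int) =>
            d.modify (PySem.Int.floordiv (p - K) K2) [] (fun l => l ++ [p]))
          (fun (u : PySem.Dict Int Int) (p : Int) =>
            u.insert p (PySem.Int.floordiv (p - K) K2))
          (fun (c : List Int) (p : Int) => c ++ [PySem.Int.floordiv (p - K) K2 + 1])]
    refine Prod.ext ?_ (Prod.ext ?_ ?_) <;> dsimp only
    · -- comm_map_down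
      rw [PySem.Dict.items_foldl_insert_fresh (PySem.List.pyRange 0 K 1) (fun i => i)
          (fun i => PySem.List.pyRange (K + i * K2) (K + (i + 1) * K2) 1) PySem.Dict.empty
          (by intro a _; simp [PySem.Dict.contains_empty])
          (by simpa using PySem.List.nodup_pyRange_one 0 K)]
      rw [pvDownB K K2 hK hK2]
      rfl
    · -- comm_map_up
      rw [PySem.Dict.items_foldl_insert_fresh (PySem.List.pyRange K (K + K * K2) 1)
          (fun p => p) (fun p => PySem.Int.floordiv (p - K) K2) PySem.Dict.empty
          (by intro a _; simp [PySem.Dict.contains_empty])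
          (by simpa using PySem.List.nodup_pyRange_one K (K + K * K2))]
      rcases lt_or_eq_of_le hK2 with hK2' | hK2'
      · have hcast : K = ((K.toNat : Int)) := by omega
        rw [hcast, pvUpItems (K.toNat : Int) K2 hK2' K.toNat,
          pvUpArith (K.toNat : Int) K2 hK2' K.toNat]
        rfl
      · -- K2 = 0 : both empty
        have hrow : ∀ i : Int, PySem.List.pyRange (K + i * K2) (K + (i + 1) * K2) 1 = [] := by
          intro i
          rw [← hK2']
          exact PySem.List.pyRange_one_eq_nil (by omega)
        have hQnil : PySem.List.pyRange K (K + K * K2) 1 = [] := by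
          rw [← hK2']
          exact PySem.List.pyRange_one_eq_nil (by omega)
        have h2 : ∀ (l : List Int) (u : PySem.Dict Int Int),
            l.foldl (fun u i => (PySem.List.pyRange (K + i * K2) (K + (i + 1) * K2) 1).foldl
              (fun u j => u.insert j i) u) u = u := by
          intro l
          induction l with
          | nil => intro u; rfl
          | cons x xs ih => intro u; rw [List.foldl_cons, hrow x, List.foldl_nil]; exact ih u
        rw [h2, hQnil]
        rfl
    · -- color_map
      rw [PySem.List.foldl_append_eq_flatMap
            (fun i => List.replicate K2.toNat (i + 1)) (PySem.List.pyRange 0 K 1),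
          PySem.List.foldl_append_singleton_eq_map
            (fun p => PySem.Int.floordiv (p - K) K2 + 1)]
      congr 1
      rcases lt_or_eq_of_le hK2 with hK2' | hK2'
      · have hcast : K = ((K.toNat : Int)) := by omega
        rw [hcast, pvColorTail (K.toNat : Int) K2 hK2' K.toNat]
      · have hQnil : PySem.List.pyRange K (K + K * K2) 1 = [] := by
          rw [← hK2']
          exact PySem.List.pyRange_one_eq_nil (by omega)
        have hPflat : (PySem.List.pyRange 0 K 1).flatMap
            (fun i => List.replicate K2.toNat (i + 1)) = [] := by
          rw [List.flatMap_eq_nil_iff]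
          intro x _
          rw [← hK2']
          rfl
        rw [hQnil, hPflat]
        rfl
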